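-- pv_equiv track=rewrite | github.com/IamHimon/paper_work_tidy | blocking/block.py | confirm_label
-- ===== SOURCE A (Python) =====
-- def confirm_label(label_list):
--     label = ''
--     if label_list:
--         for l in label_list:
--             if l:
--                 label = l
--     else:
--         label = 'Unknow'
--     return label
-- ===== SOURCE B (Python) =====
-- def confirm_label(label_list):
--     if not label_list:
--         return 'Unknow'
--     # scan back-to-front and stop at the first truthy element
--     return next((l for l in reversed(label_list) if l), '')
-- ===== Notes on version B (the rewrite author's own statement) =====
-- stated objective: idiomatic
-- what changed: Replaces A's full forward pass that keeps overwriting a running variable with a backward search: scan reversed(label_list) and return the first truthy element (early exit), '' if none, 'Unknow' for empty input.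
import Mathlib
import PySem

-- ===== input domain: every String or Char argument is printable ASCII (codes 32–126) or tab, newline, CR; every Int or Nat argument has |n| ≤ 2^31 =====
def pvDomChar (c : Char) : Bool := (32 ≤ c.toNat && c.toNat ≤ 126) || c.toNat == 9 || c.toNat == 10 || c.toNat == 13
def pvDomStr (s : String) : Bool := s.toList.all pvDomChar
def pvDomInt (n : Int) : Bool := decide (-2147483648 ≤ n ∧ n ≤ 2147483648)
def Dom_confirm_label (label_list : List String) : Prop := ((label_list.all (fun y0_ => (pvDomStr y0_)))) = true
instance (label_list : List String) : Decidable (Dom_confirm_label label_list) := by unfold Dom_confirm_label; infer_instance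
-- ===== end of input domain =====

-- B replaces A's full forward overwrite pass by a backward early-exit search (objective: idiomatic)

-- ===== PORT A =====
-- literal port of A: forward pass over the whole list overwriting a running variable
def confirm_label (label_list : List String) : String :=
  if label_list ≠ [] then
    label_list.foldl (fun label l => if l ≠ "" then l else label) ""
  else
    "Unknow"

-- ===== PORT B =====
-- B: guard empty input, then find the first truthy element of the reversed list
def confirm_label_alt (label_list : List String) : String :=
  if label_list = [] then "Unknow"
  else
    match label_list.reverse.find? (fun l => l ≠ "") with
    | some l => l
    | none => ""

-- ===== PRECONDITION & SPEC =====
def Spec_confirm_label (label_list : List String) (out : String) : Prop := out = confirm_label_alt label_list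
instance (label_list : List String) (out : String) : Decidable (Spec_confirm_label label_list out) := by unfold Spec_confirm_label; infer_instance

-- ===== CLAIM (what is proved, stated in full; the proofs are below) =====
def Claim_equal_confirm_label : Prop := ∀ (label_list : List String), Dom_confirm_label label_list → Spec_confirm_label label_list (confirm_label label_list)

-- ===== LEMMAS AND PROOFS =====

-- A's overwriting fold equals the first non-empty element found scanning from the back
lemma fold_find (xs : List String) (acc : String) :
    xs.foldl (fun label l => if l ≠ "" then l else label) acc
      = ((xs.reverse.find? (fun l => l ≠ "")).getD acc) := by
  induction xs generalizing acc with
  | nil => simp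
  | cons h t ih =>
    simp only [List.foldl_cons, List.reverse_cons, List.find?_append, ih]
    cases hf : t.reverse.find? (fun l => decide ¬l = "") <;>
      by_cases hh : h = "" <;> simp [hh]

-- ===== VERDICT (by name: the statement is the Claim_ definition above) =====
theorem confirm_label_spec : Claim_equal_confirm_label := by
  intro xs _
  unfold Spec_confirm_label confirm_label confirm_label_alt
  rcases xs with _ | ⟨h, t⟩
  · simp
  · simp only [ne_eq, reduceCtorEq, not_false_eq_true, if_true, if_false, fold_find]
    cases hf : (h :: t).reverse.find? (fun l => decide ¬l = "") <;> simp
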